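-- pv_equiv track=rewrite | github.com/GWillS163/pyCombiner | examples/realProject1/core/shtDataCalc.py | sumLv2IndexUnitScore
-- ===== SOURCE A (Python) =====
-- def sumLv2IndexUnitScore(lv3ScoreLst: list, lv2Unit: list):
--     """
--     计算核心合并单元的分数
--     [0, 1,2,3,4,5,6] & [0,1],[2,4],[6,6] * [0.2, 0.3, 0.5]
--     -> [0+1, 2+4, 6]
--     : params lv3ScoreLst: 分数序列（多少个问题就有多少个分数）
--     : params lv2Unit: 分数求和范围（单元格范围）
--     : return
--     """
--     if not lv3ScoreLst:
--         return []
--     res = []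
--     for unitScp in lv2Unit:  # 添加每个单元的分数
--         if unitScp[0] == unitScp[1]:  # 若单元只有一个单元格，则直接添加分数
--             # unit=[28, 28], but score list length is 28
--             try:
--                 res.append(lv3ScoreLst[unitScp[0]])
--             except IndexError:
--                 res.append(0)
--             continue
--         endBound = unitScp[1] + 1
--         if endBound > len(lv3ScoreLst):
--             endBound = len(lv3ScoreLst)
--         res.append(  # 若单元有多个单元格，则求和
--             sumWithNone(lv3ScoreLst[unitScp[0]:endBound]))
--     return res
--
-- def sumWithNone(lst):
--     """
--     处理包含None值的 列表求和
--     :param lst: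
--     :return:
--     """
--     return sum([validNum for validNum in lst if validNum is not None])
-- ===== SOURCE B (Python) =====
-- def sumLv2IndexUnitScore(lv3ScoreLst: list, lv2Unit: list):
--     """Prefix-sum re-implementation: each range sum is a difference of two prefix values."""
--     if not lv3ScoreLst:
--         return []
--     n = len(lv3ScoreLst)
--     pref = [0]
--     for v in lv3ScoreLst:
--         pref.append(pref[-1] + (v if v is not None else 0))
--
--     def norm(i):
--         if i < 0:
--             i += n
--         if i < 0:
--             return 0
--         return n if i > n else i
--
--     out = []
--     for u in lv2Unit:
--         a, b = u[0], u[1]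
--         if a == b:
--             out.append(lv3ScoreLst[a] if -n <= a < n else 0)
--         else:
--             end = b + 1
--             if end > n:
--                 end = n
--             lo, hi = norm(a), norm(end)
--             out.append(pref[hi] - pref[lo] if hi > lo else 0)
--     return out
-- ===== Notes on version B (the rewrite author's own statement) =====
-- stated objective: alternative
-- what changed: B builds one prefix-sum array over the None-as-0 scores and answers each multi-cell unit as a difference of two prefix values (with explicit Python slice-index normalisation), instead of A's slicing and re-summing the score list for every unit; the single-cell try/except becomes an explicit range check.
import Mathlib
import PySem

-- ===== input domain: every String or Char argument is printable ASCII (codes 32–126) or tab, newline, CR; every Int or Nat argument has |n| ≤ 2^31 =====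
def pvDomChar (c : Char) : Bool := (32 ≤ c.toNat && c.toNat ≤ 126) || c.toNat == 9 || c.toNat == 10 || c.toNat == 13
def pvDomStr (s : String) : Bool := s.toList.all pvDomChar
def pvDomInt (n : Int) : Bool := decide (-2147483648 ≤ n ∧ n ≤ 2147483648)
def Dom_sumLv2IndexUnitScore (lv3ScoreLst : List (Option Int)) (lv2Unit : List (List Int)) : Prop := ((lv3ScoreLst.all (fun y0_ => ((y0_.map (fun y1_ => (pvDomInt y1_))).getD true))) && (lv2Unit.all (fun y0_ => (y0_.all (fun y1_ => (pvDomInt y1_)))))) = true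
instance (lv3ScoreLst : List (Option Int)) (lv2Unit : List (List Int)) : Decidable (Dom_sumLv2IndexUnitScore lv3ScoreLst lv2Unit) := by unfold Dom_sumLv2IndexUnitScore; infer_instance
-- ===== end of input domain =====

-- B answers each multi-cell unit as a difference of two prefix sums over the None-as-0 scores instead of slicing and re-summing per unit; objective: alternative algorithm.


-- ===== PORT A =====
-- sumWithNone: sum([v for v in lst if v is not None])
def pvSumWithNone (lst : List (Option Int)) : Int := (lst.filterMap id).sum

def sumLv2IndexUnitScore (lv3ScoreLst : List (Option Int)) (lv2Unit : List (List Int)) : List (Option Int) :=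
  if lv3ScoreLst = [] then [] else
  lv2Unit.foldl (fun res unitScp =>
    -- Pre_ guarantees each unit has ≥ 2 entries, so pyGetD's default is never hit
    let a := PySem.List.pyGetD unitScp 0 0
    let b := PySem.List.pyGetD unitScp 1 0
    if a = b then
      -- try lv3ScoreLst[a] except IndexError: 0
      res ++ [(PySem.List.pyGet? lv3ScoreLst a).getD (some 0)]
    else
      let endBound := b + 1
      let endBound := if endBound > (lv3ScoreLst.length : Int) then (lv3ScoreLst.length : Int) else endBound
      res ++ [some (pvSumWithNone (PySem.List.slice lv3ScoreLst (some a) (some endBound)))]) []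

-- ===== PORT B =====
-- pref list built by appending pref[-1] + (v or 0)
def pvPrefStep (p : List Int) (v : Option Int) : List Int :=
  p ++ [PySem.List.pyGetD p (-1) 0 + v.getD 0]

def pvPref (lv3ScoreLst : List (Option Int)) : List Int :=
  lv3ScoreLst.foldl pvPrefStep [0]

-- norm(i): Python slice-index normalisation against length n
def pvNorm (n i : Int) : Int :=
  let i := if i < 0 then i + n else i
  if i < 0 then 0 else if i > n then n else i

def sumLv2IndexUnitScore_alt (lv3ScoreLst : List (Option Int)) (lv2Unit : List (List Int)) : List (Option Int) :=
  if lv3ScoreLst = [] then [] else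
  let n : Int := lv3ScoreLst.length
  let pref := pvPref lv3ScoreLst
  lv2Unit.map (fun u =>
    let a := PySem.List.pyGetD u 0 0
    let b := PySem.List.pyGetD u 1 0
    if a = b then
      if -n ≤ a ∧ a < n then (PySem.List.pyGet? lv3ScoreLst a).getD (some 0) else some 0
    else
      let e := b + 1
      let e := if e > n then n else e
      let lo := pvNorm n a
      let hi := pvNorm n e
      some (if hi > lo then PySem.List.pyGetD pref hi 0 - PySem.List.pyGetD pref lo 0 else 0))

-- ===== PRECONDITION & SPEC =====
-- Pre_ excludes only inputs where Python A raises IndexError: a nonempty score list with some unit of length < 2.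
def Pre_sumLv2IndexUnitScore (lv3ScoreLst : List (Option Int)) (lv2Unit : List (List Int)) : Prop :=
  lv3ScoreLst = [] ∨ ∀ u ∈ lv2Unit, 2 ≤ u.length
instance (lv3ScoreLst : List (Option Int)) (lv2Unit : List (List Int)) : Decidable (Pre_sumLv2IndexUnitScore lv3ScoreLst lv2Unit) := by unfold Pre_sumLv2IndexUnitScore; infer_instance

def pvWitness_sumLv2IndexUnitScore : List (Option Int) × List (List Int) :=
  ([some 1, none, some 3, some 4], [[0, 1], [2, 2], [1, 9], [-3, -1]])

def Spec_sumLv2IndexUnitScore (lv3ScoreLst : List (Option Int)) (lv2Unit : List (List Int)) (out : List (Option Int)) : Prop := out = sumLv2IndexUnitScore_alt lv3ScoreLst lv2Unit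
instance (lv3ScoreLst : List (Option Int)) (lv2Unit : List (List Int)) (out : List (Option Int)) : Decidable (Spec_sumLv2IndexUnitScore lv3ScoreLst lv2Unit out) := by unfold Spec_sumLv2IndexUnitScore; infer_instance

-- ===== CLAIM (what is proved, stated in full; the proofs are below) =====
def Claim_equal_sumLv2IndexUnitScore : Prop := ∀ (lv3ScoreLst : List (Option Int)) (lv2Unit : List (List Int)), Dom_sumLv2IndexUnitScore lv3ScoreLst lv2Unit → Pre_sumLv2IndexUnitScore lv3ScoreLst lv2Unit → Spec_sumLv2IndexUnitScore lv3ScoreLst lv2Unit (sumLv2IndexUnitScore lv3ScoreLst lv2Unit)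

-- ===== LEMMAS AND PROOFS =====

-- bridge: None-filtered sum = sum of getD 0
theorem sumWithNone_eq_map (lst : List (Option Int)) :
    pvSumWithNone lst = (lst.map (fun v => v.getD 0)).sum := by
  induction lst with
  | nil => rfl
  | cons x xs ih =>
    cases x <;> simp [pvSumWithNone] <;>
      simp [pvSumWithNone] at ih <;> omega

theorem pvPref_aux (ys : List (Option Int)) :
    ∀ (p : List Int) (x : Int),
    ys.foldl pvPrefStep (p ++ [x]) = p ++ List.scanl (fun s v => s + v.getD 0) x ys := by
  induction ys with
  | nil => intro p x; simp
  | cons y ys ih =>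
    intro p x
    simp only [List.foldl_cons, List.scanl]
    have : pvPrefStep (p ++ [x]) y = (p ++ [x]) ++ [x + y.getD 0] := by
      simp [pvPrefStep, PySem.List.pyGetD_neg_one_append_singleton]
    rw [this]
    have := ih (p ++ [x]) (x + y.getD 0)
    simpa using this

theorem pvPref_eq_scanl (lv3 : List (Option Int)) :
    pvPref lv3 = List.scanl (fun s v => s + v.getD 0) 0 lv3 := by
  have := pvPref_aux lv3 [] 0
  simpa [pvPref] using this

theorem pvNorm_eq_clampIdx (m : Nat) (i : Int) :
    pvNorm (m : Int) i = (PySem.List.clampIdx m i : Int) := by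
  simp only [pvNorm, PySem.List.clampIdx]
  split_ifs <;> omega

theorem pref_getD (lv3 : List (Option Int)) (k : Int) (h0 : 0 ≤ k) (h1 : k ≤ (lv3.length : Int)) :
    PySem.List.pyGetD (pvPref lv3) k 0 = ((lv3.take k.toNat).map (fun v => v.getD 0)).sum := by
  rw [pvPref_eq_scanl]
  rw [PySem.List.pyGetD_eq_getElem _ _ h0 (by simp [List.length_scanl]; omega)]
  have : (List.scanl (fun s v => s + v.getD 0) 0 lv3)[k.toNat]? =
      some (List.foldl (fun s v => s + v.getD 0) 0 (lv3.take k.toNat)) := by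
    rw [List.getElem?_scanl]; simp; omega
  have h2 : k.toNat < (List.scanl (fun s v => s + v.getD 0) 0 lv3).length := by
    simp [List.length_scanl]; omega
  rw [← List.getElem_eq_iff h2] at this
  rw [this]
  induction (lv3.take k.toNat) using List.reverseRecOn with
  | nil => rfl
  | append_singleton xs x ih => simp [ih]

-- sum over clamped slice = prefix difference
theorem sum_drop_take (xs : List (Option Int)) (lo hi : Nat) (hle : lo ≤ hi) :
    ((List.take (hi - lo) (List.drop lo xs)).map (fun v => v.getD 0)).sum =
    ((xs.take hi).map (fun v => v.getD 0)).sum - ((xs.take lo).map (fun v => v.getD 0)).sum := by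
  have h : xs.take hi = xs.take lo ++ List.take (hi - lo) (List.drop lo xs) := by
    rw [← List.take_add]; congr 1; omega
  rw [h]; simp


theorem slice_sum_eq (lv3 : List (Option Int)) (a e : Int) :
    pvSumWithNone (PySem.List.slice lv3 (some a) (some e)) =
    (if pvNorm (lv3.length : Int) e > pvNorm (lv3.length : Int) a then
      PySem.List.pyGetD (pvPref lv3) (pvNorm (lv3.length : Int) e) 0 -
      PySem.List.pyGetD (pvPref lv3) (pvNorm (lv3.length : Int) a) 0 else 0) := by
  rw [pvNorm_eq_clampIdx, pvNorm_eq_clampIdx]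
  set lo := PySem.List.clampIdx lv3.length a with hlo
  set hi := PySem.List.clampIdx lv3.length e with hhi
  have hlolen : lo ≤ lv3.length := PySem.List.clampIdx_le _ _
  have hhilen : hi ≤ lv3.length := PySem.List.clampIdx_le _ _
  simp only [PySem.List.slice, ← hlo, ← hhi]
  by_cases h : lo < hi
  · rw [if_pos (by exact_mod_cast h)]
    rw [pref_getD _ _ (by omega) (by exact_mod_cast hhilen)]
    rw [pref_getD _ _ (by omega) (by exact_mod_cast hlolen)]
    rw [sumWithNone_eq_map, sum_drop_take _ _ _ (le_of_lt h)]
    simp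
  · rw [if_neg (by exact_mod_cast h)]
    have : hi - lo = 0 := by omega
    rw [this]
    simp [pvSumWithNone]

theorem ports_eq_core (lv3ScoreLst : List (Option Int)) (lv2Unit : List (List Int)) :
    (if lv3ScoreLst = [] then [] else
      lv2Unit.foldl (fun res unitScp =>
        let a := PySem.List.pyGetD unitScp 0 0
        let b := PySem.List.pyGetD unitScp 1 0
        if a = b then
          res ++ [(PySem.List.pyGet? lv3ScoreLst a).getD (some 0)]
        else
          let endBound := b + 1
          let endBound := if endBound > (lv3ScoreLst.length : Int) then (lv3ScoreLst.length : Int) else endBound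
          res ++ [some (pvSumWithNone (PySem.List.slice lv3ScoreLst (some a) (some endBound)))]) []) =
    (if lv3ScoreLst = [] then [] else
      let n : Int := lv3ScoreLst.length
      let pref := pvPref lv3ScoreLst
      lv2Unit.map (fun u =>
        let a := PySem.List.pyGetD u 0 0
        let b := PySem.List.pyGetD u 1 0
        if a = b then
          if -n ≤ a ∧ a < n then (PySem.List.pyGet? lv3ScoreLst a).getD (some 0) else some 0
        else
          let e := b + 1
          let e := if e > n then n else e
          let lo := pvNorm n a
          let hi := pvNorm n e
          some (if hi > lo then PySem.List.pyGetD pref hi 0 - PySem.List.pyGetD pref lo 0 else 0))) := by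
  by_cases hnil : lv3ScoreLst = []
  · simp [hnil]
  · rw [if_neg hnil, if_neg hnil]
    have hfa : (fun (res : List (Option Int)) (unitScp : List Int) =>
        let a := PySem.List.pyGetD unitScp 0 0
        let b := PySem.List.pyGetD unitScp 1 0
        if a = b then
          res ++ [(PySem.List.pyGet? lv3ScoreLst a).getD (some 0)]
        else
          let endBound := b + 1
          let endBound := if endBound > (lv3ScoreLst.length : Int) then (lv3ScoreLst.length : Int) else endBound
          res ++ [some (pvSumWithNone (PySem.List.slice lv3ScoreLst (some a) (some endBound)))]) =
        (fun res u => res ++ [(fun u =>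
          let a := PySem.List.pyGetD u 0 0
          let b := PySem.List.pyGetD u 1 0
          if a = b then
            (PySem.List.pyGet? lv3ScoreLst a).getD (some 0)
          else
            let endBound := b + 1
            let endBound := if endBound > (lv3ScoreLst.length : Int) then (lv3ScoreLst.length : Int) else endBound
            some (pvSumWithNone (PySem.List.slice lv3ScoreLst (some a) (some endBound)))) u]) := by
      funext res u
      dsimp only
      split_ifs <;> rfl
    rw [hfa, PySem.List.foldl_append_singleton_eq_map]
    simp only [List.nil_append]
    apply List.map_congr_left
    intro u _
    dsimp only
    by_cases hab : PySem.List.pyGetD u 0 0 = PySem.List.pyGetD u 1 0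
    · rw [if_pos hab, if_pos hab]
      split_ifs with hr
      · rfl
      · rw [(PySem.List.pyGet?_eq_none_iff _ _).mpr (by simpa [PySem.Raise.InRange] using hr)]
        rfl
    · rw [if_neg hab, if_neg hab]
      rw [slice_sum_eq]

theorem ports_eq (lv3ScoreLst : List (Option Int)) (lv2Unit : List (List Int)) :
    sumLv2IndexUnitScore lv3ScoreLst lv2Unit = sumLv2IndexUnitScore_alt lv3ScoreLst lv2Unit :=
  ports_eq_core lv3ScoreLst lv2Unit

-- ===== VERDICT (by name: the statement is the Claim_ definition above) =====
theorem sumLv2IndexUnitScore_spec : Claim_equal_sumLv2IndexUnitScore := by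
  intro lv3ScoreLst lv2Unit _ _
  exact ports_eq lv3ScoreLst lv2Unit
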